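-- pv_equiv track=rewrite | github.com/markku63/mooc-tira-s20 | Viikko_11/listjump.py | calculate
-- ===== SOURCE A (Python) =====
-- import math
-- from heapq import heappush, heappop
--
-- class BestRoute:
--     def __init__(self,n):
--         self._verkko = [[] for _ in range(n)]
--         self._n = n
--
--     def add_jump(self,a,b,x):
--         self._verkko[a].append((b, x))
--
--     def find_route(self,a,b):
--         keko = []
--         kasitelty = [False]*self._n
--         etaisyys = [math.inf]*self._n
--         etaisyys[a] = 0
--         heappush(keko, (0, a))
--         while len(keko) != 0:
--             solmu = heappop(keko)[1]
--             if kasitelty[solmu]: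
--                 continue
--             kasitelty[solmu] = True
--             for kaari in self._verkko[solmu]:
--                 nyky = etaisyys[kaari[0]]
--                 uusi = etaisyys[solmu] + kaari[1]
--                 if uusi < nyky:
--                     etaisyys[kaari[0]] = uusi
--                     heappush(keko, (uusi, kaari[0]))
--         return etaisyys[b] if math.isfinite(etaisyys[b]) else -1
--
-- def calculate(t):
--     r = BestRoute(len(t))
--     for i in range(len(t)):
--         l = t[i]
--         if i - l >= 0:
--             r.add_jump(i, i - l, l)
--         if i + l < len(t):
--             r.add_jump(i, i + l, l)
--     return r.find_route(0, len(t) - 1)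
-- ===== SOURCE B (Python) =====
-- def calculate(t):
--     n = len(t)
--     dist = [None] * n
--     dist[0] = 0
--     done = [False] * n
--     while True:
--         u = -1
--         best = None
--         for v in range(n):
--             if not done[v] and dist[v] is not None and (best is None or dist[v] < best):
--                 u, best = v, dist[v]
--         if u < 0:
--             break
--         done[u] = True
--         l = t[u]
--         for w in (u - l, u + l):
--             if 0 <= w < n:
--                 nd = best + l
--                 if dist[w] is None or nd < dist[w]:
--                     dist[w] = nd
--     d = dist[n - 1]
--     return d if d is not None else -1
-- ===== Notes on version B (the rewrite author's own statement) =====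
-- stated objective: alternative
-- what changed: Replaces the class with an adjacency list plus a lazy-deletion binary heap by a flat selection-based Dijkstra: a single distance array, the next node picked by a linear scan, and the two jump targets computed on the fly, so no graph is prebuilt and no heap is maintained.
-- outside the precondition, e.g. on calculate([1, -3, 9, -1, 9]): A returns -3, B returns -2; on calculate([0, -3]): A returns -1, B returns -1
import Mathlib
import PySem

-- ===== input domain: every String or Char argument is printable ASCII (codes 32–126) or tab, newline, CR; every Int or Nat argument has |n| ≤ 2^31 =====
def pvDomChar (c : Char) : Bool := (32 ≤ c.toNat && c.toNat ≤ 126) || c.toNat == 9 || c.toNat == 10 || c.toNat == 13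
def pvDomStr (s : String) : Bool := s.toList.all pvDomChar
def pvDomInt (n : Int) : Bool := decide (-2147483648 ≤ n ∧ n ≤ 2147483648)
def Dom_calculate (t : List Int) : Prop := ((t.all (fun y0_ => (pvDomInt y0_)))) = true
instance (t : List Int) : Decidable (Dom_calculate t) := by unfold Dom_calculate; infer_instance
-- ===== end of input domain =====

-- B replaces A's class + adjacency list + lazy-deletion heap Dijkstra by a flat selection-based
-- Dijkstra: one distance array, edges computed on the fly, the next node found by a linear scan
-- (objective: alternative — simpler state, no heap, no prebuilt graph; same results).

-- ===== PORT A =====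
-- heapq is modelled by its observable behaviour: a list kept sorted by Python's tuple order
-- (heappush = ordered insertion, heappop = head); all pushed entries are distinct here, so this is exact.
def pvLexLt (p q : Int × Int) : Bool := p.1 < q.1 || (p.1 == q.1 && p.2 < q.2)

def pvHeapPush : List (Int × Int) → (Int × Int) → List (Int × Int)
  | [], e => [e]
  | h :: r, e => if pvLexLt e h then e :: h :: r else h :: pvHeapPush r e

-- math.inf distance is `none`; `uusi < nyky` with a possibly-infinite nyky
def pvLtInf (u : Int) : Option Int → Bool
  | none => true
  | some x => u < x

-- self._verkko[a].append((b, x))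
def pvAddJump (vk : List (List (Int × Int))) (a : Nat) (b x : Int) : List (List (Int × Int)) :=
  vk.modify a (fun es => es ++ [(b, x)])

-- the body of the build loop in calculate
def pvBuildStep (t : List Int) (vk : List (List (Int × Int))) (i : Int) : List (List (Int × Int)) :=
  let l := PySem.List.pyGetD t i 0
  let vk1 := if 0 ≤ i - l then pvAddJump vk i.toNat (i - l) l else vk
  if i + l < (t.length : Int) then pvAddJump vk1 i.toNat (i + l) l else vk1

-- the build loop in calculate: for i in range(len(t)): …
def pvBuildAdj (t : List Int) : List (List (Int × Int)) :=
  (PySem.List.pyRange 0 (t.length : Int) 1).foldl (pvBuildStep t) (List.replicate t.length [])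

-- inner for-loop of find_route (relaxing the popped node's edges); none = IndexError in Python
def pvRelaxA (solmu : Int) : List (Int × Int) → List (Option Int) → List (Int × Int) →
    Option (List (Option Int) × List (Int × Int))
  | [], dist, keko => some (dist, keko)
  | (b, w) :: es, dist, keko =>
    match PySem.List.pyGet? dist b with
    | none => none
    | some nyky =>
      match PySem.List.pyGet? dist solmu with
      | none => none
      | some none => pvRelaxA solmu es dist keko      -- etaisyys[solmu] = inf: uusi = inf, never < nyky
      | some (some du) =>
        if pvLtInf (du + w) nyky then
          pvRelaxA solmu es (PySem.List.pySetD dist b (some (du + w))) (pvHeapPush keko (du + w, b))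
        else pvRelaxA solmu es dist keko

-- termination helpers for the while-loop (cited in decreasing_by)
theorem pvPyGetSome {α : Type} (xs : List α) (i : Int) (a : α) (h : PySem.List.pyGet? xs i = some a) :
    ∃ k, ∃ hk : k < xs.length, xs[k] = a ∧ ∀ v, PySem.List.pySetD xs i v = xs.set k v := by
  simp only [PySem.List.pyGet?, PySem.List.pySetD, PySem.List.pySet?, PySem.List.pyIdx?] at h ⊢
  split_ifs at h ⊢ with h1 h2 h3 <;> simp_all
  · refine ⟨i.toNat, ⟨by omega, h⟩, fun v => rfl⟩
  · rw [List.getElem?_eq_some_iff] at h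
    obtain ⟨hk, hv⟩ := h
    exact ⟨xs.length - (-i).toNat, ⟨hk, hv⟩, fun v => rfl⟩

theorem pvCountFalse_set (xs : List Bool) (k : Nat) (hk : k < xs.length) (hx : xs[k] = false) :
    (xs.set k true).count false + 1 = xs.count false := by
  induction xs generalizing k with
  | nil => simp at hk
  | cons x xs ih =>
    cases k with
    | zero => simp_all [List.count_cons]
    | succ k =>
      simp only [List.set_cons_succ, List.count_cons]
      have := ih k (by simpa using hk) (by simpa using hx)
      omega

theorem pvCountFalse_pySetD (xs : List Bool) (i : Int) (h : PySem.List.pyGet? xs i = some false) :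
    (PySem.List.pySetD xs i true).count false < xs.count false := by
  obtain ⟨k, hk, hx, hset⟩ := pvPyGetSome xs i false h
  rw [hset]
  have := pvCountFalse_set xs k hk hx
  omega

-- while len(keko) != 0: …
def pvLoopA (verkko : List (List (Int × Int))) :
    List (Int × Int) → List Bool → List (Option Int) → List (Option Int)
  | [], _, dist => dist
  | (_, solmu) :: rest, done, dist =>
    match h : PySem.List.pyGet? done solmu with
    | none => dist                                   -- IndexError
    | some true => pvLoopA verkko rest done dist
    | some false =>
      match PySem.List.pyGet? verkko solmu with
      | none => dist                                 -- IndexError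
      | some edges =>
        match pvRelaxA solmu edges dist rest with
        | none => dist                               -- IndexError inside the for-loop
        | some (dist', keko') => pvLoopA verkko keko' (PySem.List.pySetD done solmu true) dist'
  termination_by keko done _ => (done.count false, keko.length)
  decreasing_by
  · exact Prod.Lex.right _ (by simp)
  · exact Prod.Lex.left _ _ (pvCountFalse_pySetD done solmu h)

def calculate (t : List Int) : Int :=
  let n := t.length
  let verkko := pvBuildAdj t
  match PySem.List.pySet? (List.replicate n (none : Option Int)) 0 (some 0) with
  | none => -1                                       -- n = 0: Python raises IndexError at etaisyys[a] = 0
  | some dist0 =>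
    let distF := pvLoopA verkko (pvHeapPush [] (0, 0)) (List.replicate n false) dist0
    match PySem.List.pyGet? distF ((n : Int) - 1) with
    | none => -1
    | some none => -1                                -- math.isfinite false → -1
    | some (some d) => d

-- ===== PORT B =====
-- linear scan for the unprocessed reached node with the least distance (first index wins ties)
def pvScanStep (done : List Bool) (dist : List (Option Int)) (acc : Option (Nat × Int)) (v : Nat) :
    Option (Nat × Int) :=
  if done.getD v true = false then
    match dist.getD v none with
    | none => acc
    | some d =>
      match acc with
      | none => some (v, d)
      | some (_, b) => if d < b then some (v, d) else acc
  else acc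

def pvScanMin (n : Nat) (done : List Bool) (dist : List (Option Int)) : Option (Nat × Int) :=
  (List.range n).foldl (pvScanStep done dist) none

-- one candidate jump target: if 0 <= w < n, relax dist[w] with nd
def pvRelaxB (dist : List (Option Int)) (w : Int) (nd : Int) (n : Nat) : List (Option Int) :=
  if 0 ≤ w ∧ w < (n : Int) then
    match dist.getD w.toNat none with
    | none => dist.set w.toNat (some nd)
    | some cur => if nd < cur then dist.set w.toNat (some nd) else dist
  else dist

theorem pvScanStep_sel (done : List Bool) (dist : List (Option Int)) (acc : Option (Nat × Int))
    (v : Nat) (u : Nat) (b : Int) (h : pvScanStep done dist acc v = some (u, b)) :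
    (u = v ∧ done.getD u true = false ∧ dist.getD u none = some b) ∨ acc = some (u, b) := by
  unfold pvScanStep at h
  split_ifs at h with h1
  · rcases hd : dist.getD v none with _ | d <;> rw [hd] at h
    · exact Or.inr h
    · rcases acc with _ | ⟨u', b'⟩
      · cases h; exact Or.inl ⟨rfl, h1, hd⟩
      · dsimp only at h
        split_ifs at h with h2
        · cases h; exact Or.inl ⟨rfl, h1, hd⟩
        · exact Or.inr h
  · exact Or.inr h

theorem pvScanFold_sel (done : List Bool) (dist : List (Option Int)) (n : Nat) :
    ∀ (vs : List Nat) (acc : Option (Nat × Int)) (u : Nat) (b : Int),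
    (∀ v ∈ vs, v < n) →
    (∀ u' b', acc = some (u', b') → u' < n ∧ done.getD u' true = false ∧ dist.getD u' none = some b') →
    vs.foldl (pvScanStep done dist) acc = some (u, b) →
    u < n ∧ done.getD u true = false ∧ dist.getD u none = some b := by
  intro vs
  induction vs with
  | nil => intro acc u b _ hacc h; exact hacc u b h
  | cons v vs ih =>
    intro acc u b hvs hacc h
    refine ih _ u b (fun x hx => hvs x (List.mem_cons_of_mem _ hx)) ?_ h
    intro u' b' hstep
    rcases pvScanStep_sel done dist acc v u' b' hstep with ⟨rfl, h1, h2⟩ | hold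
    · exact ⟨hvs _ (List.mem_cons_self), h1, h2⟩
    · exact hacc u' b' hold

theorem pvScanMin_sel (n : Nat) (done : List Bool) (dist : List (Option Int)) (u : Nat) (b : Int)
    (h : pvScanMin n done dist = some (u, b)) :
    u < n ∧ done.getD u true = false ∧ dist.getD u none = some b := by
  exact pvScanFold_sel done dist n (List.range n) none u b
    (fun v hv => List.mem_range.mp hv) (by simp) h

theorem pvCountFalse_set_lt (done : List Bool) (u : Nat) (h : done.getD u true = false) :
    (done.set u true).count false < done.count false := by
  have hu : u < done.length := by
    by_contra hc
    rw [List.getD_eq_default _ _ (by omega)] at h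
    exact absurd h (by simp)
  have hx : done[u] = false := by rwa [List.getD_eq_getElem _ _ hu] at h
  have := pvCountFalse_set done u hu hx
  omega

def pvLoopB (t : List Int) (n : Nat) (done : List Bool) (dist : List (Option Int)) :
    List (Option Int) :=
  match h : pvScanMin n done dist with
  | none => dist
  | some (u, best) =>
    let l := t.getD u 0
    let dist1 := pvRelaxB dist ((u : Int) - l) (best + l) n
    let dist2 := pvRelaxB dist1 ((u : Int) + l) (best + l) n
    pvLoopB t n (done.set u true) dist2
  termination_by done.count false
  decreasing_by exact pvCountFalse_set_lt done u (pvScanMin_sel n done dist u best h).2.1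

def calculate_alt (t : List Int) : Int :=
  let n := t.length
  match PySem.List.pySet? (List.replicate n (none : Option Int)) 0 (some 0) with
  | none => -1                                       -- n = 0: dist[0] = 0 raises IndexError
  | some dist0 =>
    let distF := pvLoopB t n (List.replicate n false) dist0
    match distF.getD (n - 1) none with
    | none => -1
    | some d => d

-- ===== PRECONDITION & SPEC =====
-- Pre_ excludes the empty list (A raises IndexError) and lists where some jump leaves the board:
-- a target at or past the end raises IndexError as soon as its node is reached (so whether A
-- returns at all depends on reachability), and a target before the start makes A follow Python's
-- silent negative-index wraparound to the high end of the list — an artefact no caller would specify.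
def Pre_calculate (t : List Int) : Prop :=
  t ≠ [] ∧ ∀ i : Nat, i < t.length →
    ((0 ≤ (i : Int) - t.getD i 0 → (i : Int) - t.getD i 0 < (t.length : Int)) ∧
     ((i : Int) + t.getD i 0 < (t.length : Int) → 0 ≤ (i : Int) + t.getD i 0))
instance (t : List Int) : Decidable (Pre_calculate t) := by unfold Pre_calculate; infer_instance

def pvWitness_calculate : List Int := [1, 2, 1]

def Spec_calculate (t : List Int) (out : Int) : Prop := out = calculate_alt t
instance (t : List Int) (out : Int) : Decidable (Spec_calculate t out) := by unfold Spec_calculate; infer_instance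

-- ===== CLAIM (what is proved, stated in full; the proofs are below) =====
def Claim_equal_calculate : Prop := ∀ (t : List Int), Dom_calculate t → Pre_calculate t → Spec_calculate t (calculate t)

-- ===== LEMMAS AND PROOFS =====

-- Python's tuple order on the heap entries, as a Prop
def pvLe (p q : Int × Int) : Prop := p.1 < q.1 ∨ (p.1 = q.1 ∧ p.2 ≤ q.2)

theorem pvLexLt_false_iff (p q : Int × Int) : pvLexLt p q = false ↔ pvLe q p := by
  simp [pvLexLt, pvLe]; omega

theorem pvLe_trans {a b c : Int × Int} (h1 : pvLe a b) (h2 : pvLe b c) : pvLe a c := by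
  simp only [pvLe] at *; omega

theorem pvMem_heapPush (k : List (Int × Int)) (e x : Int × Int) :
    x ∈ pvHeapPush k e ↔ x ∈ k ∨ x = e := by
  induction k with
  | nil => simp [pvHeapPush]
  | cons h r ih =>
    simp only [pvHeapPush]
    split_ifs <;> simp [ih] <;> tauto

theorem pvSorted_heapPush (k : List (Int × Int)) (e : Int × Int)
    (h : List.Pairwise pvLe k) : List.Pairwise pvLe (pvHeapPush k e) := by
  induction k with
  | nil => simp [pvHeapPush]
  | cons hd r ih =>
    rcases List.pairwise_cons.mp h with ⟨hhd, hr⟩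
    simp only [pvHeapPush]
    split_ifs with hlt
    · refine List.pairwise_cons.mpr ⟨?_, h⟩
      intro y hy
      have he : pvLe e hd := by simp only [pvLexLt, pvLe] at hlt ⊢; simp at hlt; omega
      rcases hy with _ | hy
      · exact he
      · exact pvLe_trans he (hhd y (by assumption))
    · refine List.pairwise_cons.mpr ⟨?_, ih hr⟩
      intro y hy
      rcases (pvMem_heapPush r e y).mp hy with hy' | he'
      · exact hhd y hy'
      · rw [he']; exact (pvLexLt_false_iff e hd).mp (by simpa using hlt)

-- ===== adjacency characterization =====
def pvEdges (t : List Int) (i : Nat) : List (Int × Int) :=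
  (if 0 ≤ (i : Int) - t.getD i 0 then [((i : Int) - t.getD i 0, t.getD i 0)] else []) ++
  (if (i : Int) + t.getD i 0 < (t.length : Int) then [((i : Int) + t.getD i 0, t.getD i 0)] else [])

theorem pvAddJump_length (vk : List (List (Int × Int))) (a : Nat) (b x : Int) :
    (pvAddJump vk a b x).length = vk.length := by
  unfold pvAddJump; simp

theorem pvAddJump_getD (vk : List (List (Int × Int))) (a : Nat) (b x : Int) (j : Nat) :
    (pvAddJump vk a b x).getD j [] =
      if j = a ∧ j < vk.length then vk.getD j [] ++ [(b, x)] else vk.getD j [] := by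
  unfold pvAddJump
  by_cases hj : j < vk.length
  · rw [List.getD_eq_getElem _ _ (by simpa using hj), List.getD_eq_getElem _ _ hj,
      List.getElem_modify]
    split_ifs with h1 h2 h2 <;> simp_all <;> omega
  · rw [List.getD_eq_default _ _ (by simpa using hj), List.getD_eq_default _ _ (by omega),
      if_neg (by omega)]

theorem pvBuildAdj_aux (t : List Int) (m : Nat) (hm : m ≤ t.length) :
    ((PySem.List.pyRange 0 (m : Int) 1).foldl (pvBuildStep t) (List.replicate t.length [])).length
        = t.length ∧
    ∀ i : Nat, i < t.length →
      ((PySem.List.pyRange 0 (m : Int) 1).foldl (pvBuildStep t) (List.replicate t.length [])).getD i []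
        = if i < m then pvEdges t i else [] := by
  induction m with
  | zero =>
    rw [show ((0 : Nat) : Int) = 0 by rfl, PySem.List.pyRange_one_eq_nil (by omega), List.foldl_nil]
    refine ⟨by simp, fun i hi => ?_⟩
    rw [if_neg (by omega), List.getD_eq_getElem _ _ (by simpa using hi)]
    simp
  | succ m ih =>
    obtain ⟨ihlen, ihget⟩ := ih (by omega)
    rw [show ((m + 1 : Nat) : Int) = (m : Int) + 1 by push_cast; ring,
      PySem.List.pyRange_one_succ_right (a := 0) (b := (m : Int)) (by omega), List.foldl_append, List.foldl_cons,
      List.foldl_nil]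
    set prev := (PySem.List.pyRange 0 (m : Int) 1).foldl (pvBuildStep t) (List.replicate t.length [])
      with hprev
    have hstep : pvBuildStep t prev (m : Int) =
        (let l := t.getD m 0
         let vk1 := if 0 ≤ (m : Int) - l then pvAddJump prev m ((m : Int) - l) l else prev
         if (m : Int) + l < (t.length : Int) then pvAddJump vk1 m ((m : Int) + l) l else vk1) := by
      unfold pvBuildStep
      rw [PySem.List.pyGetD_natCast, Int.toNat_natCast]
    rw [hstep]
    have hm' : m < t.length := by omega
    have hgm : prev.getD m [] = [] := by rw [ihget m hm', if_neg (by omega)]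
    constructor
    · dsimp only
      split_ifs <;> simp [pvAddJump_length, ihlen]
    · intro i hi
      dsimp only
      by_cases him : i = m
      · subst him
        rw [if_pos (Nat.lt_succ_self i)]
        have hget1 : ∀ b x, (pvAddJump prev i b x).getD i [] = [(b, x)] := by
          intro b x
          rw [pvAddJump_getD, if_pos ⟨rfl, ihlen ▸ hm'⟩, hgm]
          rfl
        have hget2 : ∀ b x b' x',
            (pvAddJump (pvAddJump prev i b x) i b' x').getD i [] = [(b, x), (b', x')] := by
          intro b x b' x'
          rw [pvAddJump_getD, if_pos ⟨rfl, by rw [pvAddJump_length, ihlen]; exact hm'⟩, hget1]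
          rfl
        unfold pvEdges
        split_ifs with h1 h2 <;>
          first
          | (rw [hget2]; rfl)
          | (rw [hget1]; rfl)
          | (rw [hget1]; simp)
          | (rw [hgm]; rfl)
          | (rw [hgm]; simp)
      · have haj : ∀ (vk : List (List (Int × Int))) (b x : Int),
            (pvAddJump vk m b x).getD i [] = vk.getD i [] := by
          intro vk b x
          rw [pvAddJump_getD, if_neg (by simp [him])]
        have hres : (if i < m + 1 then pvEdges t i else []) =
            (if i < m then pvEdges t i else []) := by
          by_cases h : i < m
          · rw [if_pos (by omega), if_pos h]
          · rw [if_neg (by omega), if_neg h]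
        rw [hres]
        split_ifs <;> (try rw [haj]) <;> (try rw [haj]) <;> rw [ihget i hi] <;>
          split_ifs <;> first | rfl | (exfalso; omega)

theorem pvBuildAdj_spec (t : List Int) :
    (pvBuildAdj t).length = t.length ∧
    ∀ i : Nat, i < t.length → (pvBuildAdj t).getD i [] = pvEdges t i := by
  obtain ⟨h1, h2⟩ := pvBuildAdj_aux t t.length (le_refl _)
  unfold pvBuildAdj
  refine ⟨h1, fun i hi => ?_⟩
  rw [h2 i hi, if_pos hi]

-- ===== scanMin characterization =====
def pvCand (n : Nat) (done : List Bool) (dist : List (Option Int)) (v : Nat) (d : Int) : Prop :=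
  v < n ∧ done.getD v true = false ∧ dist.getD v none = some d

theorem pvScanMin_succ (n : Nat) (done : List Bool) (dist : List (Option Int)) :
    pvScanMin (n + 1) done dist = pvScanStep done dist (pvScanMin n done dist) n := by
  unfold pvScanMin; rw [List.range_succ, List.foldl_append]; rfl

theorem pvScanStep_eq_none (done : List Bool) (dist : List (Option Int))
    (acc : Option (Nat × Int)) (v : Nat) (h : pvScanStep done dist acc v = none) :
    acc = none ∧ (done.getD v true = false → dist.getD v none = none) := by
  unfold pvScanStep at h
  split_ifs at h with h1
  · rcases hd : dist.getD v none with _ | d <;> rw [hd] at h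
    · exact ⟨h, fun _ => rfl⟩
    · dsimp only at h
      rcases acc with _ | ⟨u', b'⟩
      · simp at h
      · dsimp only at h; split_ifs at h <;> simp_all
  · exact ⟨h, fun hf => absurd hf h1⟩

theorem pvScanStep_eq_some (done : List Bool) (dist : List (Option Int))
    (acc : Option (Nat × Int)) (v : Nat) (u : Nat) (b : Int)
    (h : pvScanStep done dist acc v = some (u, b)) :
    (∃ d, dist.getD v none = some d ∧ done.getD v true = false ∧
        ((acc = none ∧ u = v ∧ b = d) ∨ (∃ u' b', acc = some (u', b') ∧
           ((d < b' ∧ u = v ∧ b = d) ∨ (¬ d < b' ∧ u = u' ∧ b = b'))))) ∨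
    ((¬ (done.getD v true = false) ∨ dist.getD v none = none) ∧ acc = some (u, b)) := by
  unfold pvScanStep at h
  split_ifs at h with h1
  · rcases hd : dist.getD v none with _ | d <;> rw [hd] at h
    · exact Or.inr ⟨Or.inr rfl, h⟩
    · dsimp only at h
      rcases acc with _ | ⟨u', b'⟩
      · simp only [Option.some_inj, Prod.mk.injEq] at h
        exact Or.inl ⟨d, rfl, h1, Or.inl ⟨rfl, h.1.symm, h.2.symm⟩⟩
      · dsimp only at h
        split_ifs at h with h2 <;> simp only [Option.some_inj, Prod.mk.injEq] at h
        · exact Or.inl ⟨d, rfl, h1, Or.inr ⟨u', b', rfl, Or.inl ⟨h2, h.1.symm, h.2.symm⟩⟩⟩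
        · exact Or.inl ⟨d, rfl, h1, Or.inr ⟨u', b', rfl, Or.inr ⟨h2, h.1.symm, h.2.symm⟩⟩⟩
  · exact Or.inr ⟨Or.inl h1, h⟩

theorem pvGetD_det {v : Nat} {dist : List (Option Int)} {d d' : Int}
    (h1 : dist.getD v none = some d) (h2 : dist.getD v none = some d') : d = d' := by
  rw [h1] at h2; exact Option.some_inj.mp h2

theorem pvScanMin_none (n : Nat) (done : List Bool) (dist : List (Option Int))
    (h : pvScanMin n done dist = none) : ∀ v d, ¬ pvCand n done dist v d := by
  induction n with
  | zero => intro v d hc; exact absurd hc.1 (by omega)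
  | succ n ih =>
    rw [pvScanMin_succ] at h
    obtain ⟨hacc, hlast⟩ := pvScanStep_eq_none done dist _ n h
    intro v d hc
    rcases Nat.lt_succ_iff_lt_or_eq.mp hc.1 with hv | hveq
    · exact ih hacc v d ⟨hv, hc.2⟩
    · have h2 := hc.2.2
      rw [hveq, hlast (hveq ▸ hc.2.1)] at h2
      exact absurd h2 (by simp)

theorem pvScanMin_min (n : Nat) (done : List Bool) (dist : List (Option Int)) (u : Nat) (b : Int)
    (h : pvScanMin n done dist = some (u, b)) :
    ∀ v d, pvCand n done dist v d → b < d ∨ (b = d ∧ u ≤ v) := by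
  induction n generalizing u b with
  | zero => intro v d hc; exact absurd hc.1 (by omega)
  | succ n ih =>
    rw [pvScanMin_succ] at h
    intro v d hc
    have hclt : v < n ∨ v = n := Nat.lt_succ_iff_lt_or_eq.mp hc.1
    rcases pvScanStep_eq_some done dist _ n u b h with
      ⟨dn, hdn, hfn, ⟨hacc, hu, hb⟩ | ⟨u', b', hacc, hcase⟩⟩ | ⟨hno, hacc⟩
    · rcases hclt with hv | hveq
      · exact absurd ⟨hv, hc.2⟩ (pvScanMin_none n done dist hacc v d)
      · have : d = dn := pvGetD_det (hveq ▸ hc.2.2) hdn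
        omega
    · have hsel := pvScanMin_sel n done dist u' b' hacc
      have hmin' := ih u' b' hacc
      rcases hcase with ⟨h2, hu, hb⟩ | ⟨h2, hu, hb⟩
      · rcases hclt with hv | hveq
        · have := hmin' v d ⟨hv, hc.2⟩; omega
        · have : d = dn := pvGetD_det (hveq ▸ hc.2.2) hdn; omega
      · rcases hclt with hv | hveq
        · have := hmin' v d ⟨hv, hc.2⟩; omega
        · have hddn : d = dn := pvGetD_det (hveq ▸ hc.2.2) hdn
          have hun : u' ≤ n := by have := hsel.1; omega
          omega
    · rcases hclt with hv | hveq
      · exact ih u b hacc v d ⟨hv, hc.2⟩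
      · rcases hno with h1 | h1
        · exact absurd (hveq ▸ hc.2.1) h1
        · have h2 := hveq ▸ hc.2.2
          rw [h1] at h2
          exact absurd h2 (by simp)

theorem pvScanMin_eq_some (n : Nat) (done : List Bool) (dist : List (Option Int)) (u : Nat) (b : Int)
    (hc : pvCand n done dist u b)
    (hmin : ∀ v d, pvCand n done dist v d → b < d ∨ (b = d ∧ u ≤ v)) :
    pvScanMin n done dist = some (u, b) := by
  rcases h : pvScanMin n done dist with _ | ⟨u', b'⟩
  · exact absurd hc (pvScanMin_none n done dist h u b)
  · have hsel := pvScanMin_sel n done dist u' b' h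
    have h1 := pvScanMin_min n done dist u' b' h u b hc
    have h2 := hmin u' b' ⟨hsel.1, hsel.2.1, hsel.2.2⟩
    have : u = u' ∧ b = b' := by omega
    rw [this.1, this.2]

-- ===== the invariant tying A's heap state to B's array state =====
def pvInv (n : Nat) (keko : List (Int × Int)) (done : List Bool) (dist : List (Option Int)) : Prop :=
  done.length = n ∧ dist.length = n ∧ List.Pairwise pvLe keko ∧
  (∀ k v, (k, v) ∈ keko → ∃ w : Nat, w < n ∧ v = (w : Int) ∧
      ∃ d, dist.getD w none = some d ∧ d ≤ k) ∧
  (∀ v : Nat, v < n → done.getD v true = false → ∀ d, dist.getD v none = some d →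
      (d, (v : Int)) ∈ keko)

-- one relaxation step preserves everything B cannot see except the heap
theorem pvRelaxB_inrange (dist : List (Option Int)) (n : Nat) (w nd : Int)
    (h0 : 0 ≤ w) (h1 : w < (n : Int)) :
    pvRelaxB dist w nd n =
      if pvLtInf nd (dist.getD w.toNat none) then dist.set w.toNat (some nd) else dist := by
  unfold pvRelaxB
  rw [if_pos ⟨h0, h1⟩]
  rcases hd : dist.getD w.toNat none with _ | cur <;> simp [pvLtInf]

theorem pvRelaxB_oob (dist : List (Option Int)) (n : Nat) (w nd : Int)
    (h : ¬ (0 ≤ w ∧ w < (n : Int))) : pvRelaxB dist w nd n = dist := by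
  unfold pvRelaxB; rw [if_neg h]

-- ===== generic getD/set helpers =====
theorem pvGetD_set {α : Type} (xs : List α) (w v : Nat) (a d : α) :
    (xs.set w a).getD v d = if w = v ∧ v < xs.length then a else xs.getD v d := by
  by_cases hv : v < xs.length
  · rw [List.getD_eq_getElem _ _ (by simpa using hv), List.getElem_set]
    by_cases hwv : w = v
    · rw [if_pos hwv, if_pos ⟨hwv, hv⟩]
    · rw [if_neg hwv, if_neg (by tauto), List.getD_eq_getElem _ _ hv]
  · rw [List.getD_eq_default _ _ (by simpa using (by omega : ¬ v < xs.length)),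
      List.getD_eq_default _ _ (by omega), if_neg (by tauto)]

theorem pvPyGet_int {α : Type} (xs : List α) (i : Int) (d : α) (h0 : 0 ≤ i)
    (h1 : i < (xs.length : Int)) :
    PySem.List.pyGet? xs i = some (xs.getD i.toNat d) := by
  rw [PySem.List.pyGet?_eq_some_getElem xs h0 h1, List.getD_eq_getElem _ _ (by omega)]

theorem pvPyGet_inrange {α : Type} (xs : List α) (w : Nat) (d : α) (hw : w < xs.length) :
    PySem.List.pyGet? xs ((w : Nat) : Int) = some (xs.getD w d) := by
  rw [PySem.List.pyGet?_natCast, List.getElem?_eq_getElem hw, List.getD_eq_getElem _ _ hw]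

-- ===== unfolding equations for the two loops =====
theorem pvLoopA_nil (vk : List (List (Int × Int))) (done : List Bool) (dist : List (Option Int)) :
    pvLoopA vk [] done dist = dist := by rw [pvLoopA]

theorem pvLoopA_cons_skip (vk : List (List (Int × Int))) (k solmu : Int)
    (rest : List (Int × Int)) (done : List Bool) (dist : List (Option Int))
    (h : PySem.List.pyGet? done solmu = some true) :
    pvLoopA vk ((k, solmu) :: rest) done dist = pvLoopA vk rest done dist := by
  rw [pvLoopA]
  split
  · rename_i heq; rw [h] at heq; cases heq
  · rfl
  · rename_i heq; rw [h] at heq; cases heq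

theorem pvLoopA_cons_proc (vk : List (List (Int × Int))) (k solmu : Int)
    (rest : List (Int × Int)) (done : List Bool) (dist : List (Option Int))
    (edges : List (Int × Int)) (dist' : List (Option Int)) (keko' : List (Int × Int))
    (h : PySem.List.pyGet? done solmu = some false)
    (hv : PySem.List.pyGet? vk solmu = some edges)
    (hr : pvRelaxA solmu edges dist rest = some (dist', keko')) :
    pvLoopA vk ((k, solmu) :: rest) done dist =
      pvLoopA vk keko' (PySem.List.pySetD done solmu true) dist' := by
  rw [pvLoopA]
  split
  · rename_i heq; rw [h] at heq; cases heq
  · rename_i heq; rw [h] at heq; cases heq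
  · simp only [hv, hr]

theorem pvLoopB_none (t : List Int) (n : Nat) (done : List Bool) (dist : List (Option Int))
    (h : pvScanMin n done dist = none) : pvLoopB t n done dist = dist := by
  rw [pvLoopB]
  split
  · rfl
  · rename_i heq; rw [h] at heq; cases heq

theorem pvLoopB_some (t : List Int) (n : Nat) (done : List Bool) (dist : List (Option Int))
    (u : Nat) (best : Int) (h : pvScanMin n done dist = some (u, best)) :
    pvLoopB t n done dist =
      pvLoopB t n (done.set u true)
        (pvRelaxB (pvRelaxB dist ((u : Int) - t.getD u 0) (best + t.getD u 0) n)
          ((u : Int) + t.getD u 0) (best + t.getD u 0) n) := by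
  rw [pvLoopB]
  split
  · rename_i heq; rw [h] at heq; cases heq
  · rename_i u' best' heq
    rw [h] at heq
    obtain ⟨rfl, rfl⟩ := Prod.mk.injEq .. ▸ Option.some_inj.mp heq
    rfl

-- ===== relaxation of one node, A-side vs B-side =====
theorem pvRelaxA_append (solmu : Int) (es1 es2 : List (Int × Int)) (dist : List (Option Int))
    (keko : List (Int × Int)) :
    pvRelaxA solmu (es1 ++ es2) dist keko =
      (pvRelaxA solmu es1 dist keko).bind (fun p => pvRelaxA solmu es2 p.1 p.2) := by
  induction es1 generalizing dist keko with
  | nil => rfl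
  | cons e es ih =>
    rcases e with ⟨b, wt⟩
    rw [List.cons_append, pvRelaxA, pvRelaxA]
    rcases h1 : PySem.List.pyGet? dist b with _ | nyky
    · rfl
    · rcases h2 : PySem.List.pyGet? dist solmu with _ | du
      · rfl
      · rcases du with _ | du
        · exact ih dist keko
        · dsimp only
          split_ifs <;> exact ih _ _

theorem pvRelaxA_single (n : Nat) (solmu b wt : Int) (dist : List (Option Int))
    (keko : List (Int × Int)) (w : Nat) (du : Int)
    (hsv : solmu = ((w : Nat) : Int)) (hw : w < n)
    (hb : 0 ≤ b) (hbl : b < (n : Int)) (hlen : dist.length = n)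
    (hd : dist.getD w none = some du) :
    pvRelaxA solmu [(b, wt)] dist keko =
      some (pvRelaxB dist b (du + wt) n,
        if pvLtInf (du + wt) (dist.getD b.toNat none) then pvHeapPush keko (du + wt, b)
        else keko) := by
  rw [pvRelaxA, pvPyGet_int dist b none hb (by omega), hsv,
    pvPyGet_inrange dist w (none : Option Int) (by omega), hd]
  dsimp only
  rw [pvRelaxB_inrange dist n b (du + wt) hb hbl]
  split_ifs with hlt
  · rw [PySem.List.pySetD_of_nonneg dist _ hb, pvRelaxA]
  · rw [pvRelaxA]

theorem pvRelaxB_preserve (dist : List (Option Int)) (n : Nat) (b nd : Int) (w : Nat)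
    (hnew : b = ((w : Nat) : Int) → ¬ pvLtInf nd (dist.getD w none) = true) :
    (pvRelaxB dist b nd n).getD w none = dist.getD w none := by
  by_cases hg : 0 ≤ b ∧ b < (n : Int)
  · rw [pvRelaxB_inrange dist n b nd hg.1 hg.2]
    split_ifs with h1
    · rw [pvGetD_set]
      split_ifs with h2
      · exfalso
        have hbe : b = ((w : Nat) : Int) := by omega
        rw [hbe] at h1
        simp only [Int.toNat_natCast] at h1
        exact hnew hbe h1
      · rfl
    · rfl
  · rw [pvRelaxB_oob dist n b nd hg]

-- ===== invariant transport across one relaxation =====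
theorem pvInvStep (n : Nat) (keko : List (Int × Int)) (done : List Bool)
    (dist : List (Option Int)) (b nd : Int) (hb : 0 ≤ b) (hbl : b < (n : Int))
    (hinv : pvInv n keko done dist) :
    pvInv n (if pvLtInf nd (dist.getD b.toNat none) then pvHeapPush keko (nd, b) else keko)
      done (pvRelaxB dist b nd n) := by
  obtain ⟨hl1, hl2, hsor, hH1, hH2⟩ := hinv
  have hbn : b.toNat < n := by omega
  have hbc : ((b.toNat : Nat) : Int) = b := by omega
  have hlen' : (pvRelaxB dist b nd n).length = dist.length := by
    unfold pvRelaxB; split_ifs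
    · rcases hd : dist.getD b.toNat none with _ | cur <;> simp
      split_ifs <;> simp
    · rfl
  have hget' : ∀ v : Nat, (pvRelaxB dist b nd n).getD v none =
      if pvLtInf nd (dist.getD b.toNat none) = true ∧ v = b.toNat then some nd
      else dist.getD v none := by
    intro v
    rw [pvRelaxB_inrange dist n b nd hb hbl]
    split_ifs with h1 h2 h2
    · rw [pvGetD_set, if_pos ⟨h2.2.symm, by omega⟩]
    · rw [pvGetD_set, if_neg (by rw [hl2]; intro hx; exact h2 ⟨h1, hx.1.symm⟩)]
    · exact absurd h2.1 h1
    · rfl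
  have hdec : ∀ v : Nat, ∀ dv : Int, dist.getD v none = some dv →
      ∃ dv', (pvRelaxB dist b nd n).getD v none = some dv' ∧ dv' ≤ dv := by
    intro v dv hdv
    rw [hget']
    split_ifs with h1
    · refine ⟨nd, rfl, ?_⟩
      rcases h1 with ⟨hlt, rfl⟩
      rw [hdv] at hlt
      simp [pvLtInf] at hlt
      omega
    · exact ⟨dv, hdv, le_refl _⟩
  refine ⟨hl1, by rw [hlen', hl2], ?_, ?_, ?_⟩
  · split_ifs
    · exact pvSorted_heapPush keko (nd, b) hsor
    · exact hsor
  · intro k v hkv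
    split_ifs at hkv with himp
    · rcases (pvMem_heapPush keko (nd, b) (k, v)).mp hkv with hold | hnew
      · obtain ⟨w, hw, hvw, d, hd, hdk⟩ := hH1 k v hold
        obtain ⟨d', hd', hdd⟩ := hdec w d hd
        exact ⟨w, hw, hvw, d', hd', by omega⟩
      · rcases Prod.mk.injEq .. ▸ hnew with ⟨hk, hv⟩
        refine ⟨b.toNat, hbn, by omega, nd, ?_, by omega⟩
        rw [hget', if_pos ⟨himp, rfl⟩]
    · obtain ⟨w, hw, hvw, d, hd, hdk⟩ := hH1 k v hkv
      obtain ⟨d', hd', hdd⟩ := hdec w d hd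
      exact ⟨w, hw, hvw, d', hd', by omega⟩
  · intro v hv hund d hd
    rw [hget'] at hd
    split_ifs at hd with h1
    · rcases h1 with ⟨hlt, rfl⟩
      rw [if_pos hlt]
      have hde : d = nd := (Option.some_inj.mp hd).symm
      subst hde
      have heq : ((d, ((b.toNat : Nat) : Int)) : Int × Int) = (d, b) := by rw [hbc]
      exact (pvMem_heapPush keko (d, b) _).mpr (Or.inr heq)
    · have hmem := hH2 v hv hund d hd
      split_ifs with h2
      · exact (pvMem_heapPush keko (nd, b) _).mpr (Or.inl hmem)
      · exact hmem

-- ===== popping the head entry of a finished node preserves the invariant =====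
theorem pvInv_tail (n : Nat) (k v : Int) (rest : List (Int × Int)) (done : List Bool)
    (dist : List (Option Int)) (hinv : pvInv n ((k, v) :: rest) done dist)
    (hvd : ∀ w : Nat, v = ((w : Nat) : Int) → done.getD w true = true) :
    pvInv n rest done dist := by
  obtain ⟨hl1, hl2, hsor, hH1, hH2⟩ := hinv
  refine ⟨hl1, hl2, List.Pairwise.of_cons hsor, ?_, ?_⟩
  · intro k' v' hkv
    exact hH1 k' v' (List.mem_cons_of_mem _ hkv)
  · intro w hw hund d hd
    rcases List.mem_cons.mp (hH2 w hw hund d hd) with hhead | hrest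
    · exfalso
      have := hhead
      simp only [Prod.mk.injEq] at this
      rw [hvd w this.2.symm] at hund
      simp at hund
    · exact hrest

-- ===== relax one optional edge: A-side computation + invariant transport =====
theorem pvRelaxB_length (dist : List (Option Int)) (n : Nat) (w nd : Int) :
    (pvRelaxB dist w nd n).length = dist.length := by
  unfold pvRelaxB
  split_ifs
  · rcases hd : dist.getD w.toNat none with _ | cur <;> simp
    split_ifs <;> simp
  · rfl

theorem pvRelaxEdge (n : Nat) (w : Nat) (du l b : Int) (dist : List (Option Int))
    (keko : List (Int × Int)) (done : List Bool) (g : Prop) [Decidable g]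
    (hgiff : g ↔ (0 ≤ b ∧ b < (n : Int)))
    (hw : w < n) (hlen : dist.length = n) (hd : dist.getD w none = some du)
    (hinv : pvInv n keko done dist) :
    ∃ keko', pvRelaxA ((w : Nat) : Int) (if g then [(b, l)] else []) dist keko =
        some (pvRelaxB dist b (du + l) n, keko')
      ∧ pvInv n keko' done (pvRelaxB dist b (du + l) n) := by
  by_cases hg : g
  · rw [if_pos hg]
    obtain ⟨hb, hbl⟩ := hgiff.mp hg
    exact ⟨_, pvRelaxA_single n _ b l dist keko w du rfl hw hb hbl hlen hd,
      pvInvStep n keko done dist b (du + l) hb hbl hinv⟩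
  · rw [if_neg hg, pvRelaxB_oob dist n b (du + l) (fun hc => hg (hgiff.mpr hc))]
    exact ⟨keko, by rw [pvRelaxA], hinv⟩

theorem pvInv_pop (n : Nat) (k v : Int) (rest : List (Int × Int)) (done : List Bool)
    (dist : List (Option Int)) (w : Nat) (hinv : pvInv n ((k, v) :: rest) done dist)
    (hvw : v = ((w : Nat) : Int)) (hw : w < n) :
    pvInv n rest (done.set w true) dist := by
  obtain ⟨hl1, hl2, hsor, hH1, hH2⟩ := hinv
  refine ⟨by simp [hl1], hl2, List.Pairwise.of_cons hsor,
    fun k' v' h => hH1 k' v' (List.mem_cons_of_mem _ h), ?_⟩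
  intro v' hv' hund d' hd'
  rw [pvGetD_set] at hund
  split_ifs at hund with hcond
  rcases List.mem_cons.mp (hH2 v' hv' hund d' hd') with hh | hr
  · exfalso
    simp only [Prod.mk.injEq] at hh
    have hc1 : ((v' : Nat) : Int) = ((w : Nat) : Int) := by rw [hh.2, hvw]
    exact hcond ⟨by omega, by omega⟩
  · exact hr

-- ===== main bisimulation =====
theorem pvMain (t : List Int) (n : Nat) (hn : n = t.length)
    (hpre : ∀ i : Nat, i < t.length →
      ((0 ≤ (i : Int) - t.getD i 0 → (i : Int) - t.getD i 0 < (t.length : Int)) ∧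
       ((i : Int) + t.getD i 0 < (t.length : Int) → 0 ≤ (i : Int) + t.getD i 0))) :
    ∀ (c : Nat) (keko : List (Int × Int)) (done : List Bool) (dist : List (Option Int)),
      done.count false ≤ c → pvInv n keko done dist →
      pvLoopA (pvBuildAdj t) keko done dist = pvLoopB t n done dist := by
  intro c
  induction c with
  | zero =>
    intro keko done dist hc hinv
    have hcz : done.count false = 0 := Nat.le_zero.mp hc
    have hnof : ∀ v : Nat, done.getD v true = true := by
      intro v
      by_cases hv : v < done.length
      · rw [List.getD_eq_getElem _ _ hv]
        cases hbv : done[v] with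
        | true => rfl
        | false =>
          exfalso
          exact (List.count_eq_zero.mp hcz) (hbv ▸ List.getElem_mem hv)
      · rw [List.getD_eq_default _ _ (by omega)]
    have hB : pvLoopB t n done dist = dist := by
      apply pvLoopB_none
      rcases hs : pvScanMin n done dist with _ | ⟨u, b⟩
      · rfl
      · have hsel := pvScanMin_sel n done dist u b hs
        rw [hnof u] at hsel
        exact absurd hsel.2.1 (by simp)
    rw [hB]
    obtain ⟨hl1, hl2, hsor, hH1, hH2⟩ := hinv
    clear hc hcz hH2 hB
    induction keko with
    | nil => exact pvLoopA_nil _ done dist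
    | cons e rest ih =>
      rcases e with ⟨k, v⟩
      obtain ⟨w, hw, hvw, d, hd, hdk⟩ := hH1 k v List.mem_cons_self
      have hskip : PySem.List.pyGet? done v = some true := by
        rw [hvw, pvPyGet_inrange done w true (by omega), hnof w]
      rw [pvLoopA_cons_skip _ k v rest done dist hskip]
      exact ih (List.Pairwise.of_cons hsor)
        (fun k' v' h => hH1 k' v' (List.mem_cons_of_mem _ h))
  | succ c ihc =>
    intro keko done dist hc hinv
    revert hinv
    induction keko with
    | nil =>
      intro hinv
      rw [pvLoopA_nil]
      symm
      apply pvLoopB_none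
      rcases hs : pvScanMin n done dist with _ | ⟨u, b⟩
      · rfl
      · have hsel := pvScanMin_sel n done dist u b hs
        exact absurd (hinv.2.2.2.2 u hsel.1 hsel.2.1 b hsel.2.2) (by simp)
    | cons e rest ih =>
      intro hinv
      have hl1 := hinv.1
      have hl2 := hinv.2.1
      have hsor := hinv.2.2.1
      have hH1 := hinv.2.2.2.1
      have hH2 := hinv.2.2.2.2
      rcases e with ⟨k, v⟩
      obtain ⟨w, hw, hvw, d, hd, hdk⟩ := hH1 k v List.mem_cons_self
      cases hbv : done.getD w true with
      | true =>
        have hskip : PySem.List.pyGet? done v = some true := by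
          rw [hvw, pvPyGet_inrange done w true (by omega), hbv]
        rw [pvLoopA_cons_skip _ k v rest done dist hskip]
        refine ih (pvInv_tail n k v rest done dist hinv ?_)
        intro w' hvw'
        have : w' = w := by rw [hvw] at hvw'; omega
        rw [this, hbv]
      | false =>
        -- d is the head key: d = k
        have hdkk : d = k := by
          rcases List.mem_cons.mp (hH2 w hw hbv d hd) with hh | hr
          · simp only [Prod.mk.injEq] at hh
            exact hh.1
          · have hle := (List.pairwise_cons.mp hsor).1 _ hr
            simp only [pvLe] at hle
            rcases hle with h' | h' <;> omega
        subst hdkk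
        -- B selects exactly (w, d)
        have hcand : pvCand n done dist w d := ⟨hw, hbv, hd⟩
        have hmin : ∀ v' d', pvCand n done dist v' d' → d < d' ∨ (d = d' ∧ w ≤ v') := by
          intro v' d' hc'
          rcases List.mem_cons.mp (hH2 v' hc'.1 hc'.2.1 d' hc'.2.2) with hh | hr
          · simp only [Prod.mk.injEq] at hh
            have : ((v' : Nat) : Int) = ((w : Nat) : Int) := by rw [hh.2, hvw]
            exact Or.inr ⟨hh.1.symm, by omega⟩
          · have hle := (List.pairwise_cons.mp hsor).1 _ hr
            simp only [pvLe] at hle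
            rw [hvw] at hle
            rcases hle with h' | h' <;> [exact Or.inl h'; exact Or.inr ⟨h'.1, by omega⟩]
        have hscan := pvScanMin_eq_some n done dist w d hcand hmin
        -- A pops (d, v) and processes node w
        have hproc : PySem.List.pyGet? done v = some false := by
          rw [hvw, pvPyGet_inrange done w true (by omega), hbv]
        obtain ⟨hblen, hbget⟩ := pvBuildAdj_spec t
        have hvget : PySem.List.pyGet? (pvBuildAdj t) v = some (pvEdges t w) := by
          rw [hvw, pvPyGet_inrange (pvBuildAdj t) w [] (by omega), hbget w (by omega)]
        have hinv0 : pvInv n rest (done.set w true) dist := pvInv_pop n d v rest done dist w hinv hvw hw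
        have hprew := hpre w (by omega)
        -- first edge: target w - t[w]
        obtain ⟨keko1, hr1, hinv1⟩ := pvRelaxEdge n w d (t.getD w 0) ((w : Int) - t.getD w 0)
          dist rest (done.set w true) (0 ≤ (w : Int) - t.getD w 0)
          (by constructor
              · intro hg; exact ⟨hg, by have := hprew.1 hg; omega⟩
              · intro hg; exact hg.1)
          hw hl2 hd hinv0
        -- the source's own distance is untouched by the first relaxation
        have hd1 : (pvRelaxB dist ((w : Int) - t.getD w 0) (d + t.getD w 0) n).getD w none
            = some d := by
          rw [pvRelaxB_preserve dist n _ _ w ?_]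
          · exact hd
          · intro hbe
            have hl0 : t.getD w 0 = 0 := by omega
            rw [hl0, hd]
            simp [pvLtInf]
        -- second edge: target w + t[w]
        obtain ⟨keko2, hr2, hinv2⟩ := pvRelaxEdge n w d (t.getD w 0) ((w : Int) + t.getD w 0)
          (pvRelaxB dist ((w : Int) - t.getD w 0) (d + t.getD w 0) n) keko1 (done.set w true)
          ((w : Int) + t.getD w 0 < (t.length : Int))
          (by constructor
              · intro hg; exact ⟨hprew.2 hg, by omega⟩
              · intro hg; omega)
          hw (by rw [pvRelaxB_length]; exact hl2) hd1 hinv1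
        -- assemble A's relaxation of both edges
        have hrel : pvRelaxA v (pvEdges t w) dist rest =
            some (pvRelaxB (pvRelaxB dist ((w : Int) - t.getD w 0) (d + t.getD w 0) n)
                ((w : Int) + t.getD w 0) (d + t.getD w 0) n, keko2) := by
          rw [hvw]
          unfold pvEdges
          rw [pvRelaxA_append, hr1]
          exact hr2
        rw [pvLoopA_cons_proc _ d v rest done dist (pvEdges t w) _ keko2 hproc hvget hrel]
        have hsetD : PySem.List.pySetD done v true = done.set w true := by
          rw [hvw, PySem.List.pySetD_of_nonneg done true (by omega)]
          simp
        rw [hsetD, pvLoopB_some t n done dist w d hscan]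
        -- recurse: one more node is finished
        have hwlen : w < done.length := by omega
        have hgw : done[w] = false := by rwa [List.getD_eq_getElem _ _ hwlen] at hbv
        have hcnt : (done.set w true).count false ≤ c := by
          have := pvCountFalse_set done w hwlen hgw
          omega
        exact ihc keko2 (done.set w true) _ hcnt hinv2

theorem pvLoopB_length (t : List Int) (n : Nat) (done : List Bool) (dist : List (Option Int)) :
    (pvLoopB t n done dist).length = dist.length := by
  induction done, dist using pvLoopB.induct t n with
  | case1 done dist h => rw [pvLoopB, h]
  | case2 done dist u best h l dist1 dist2 ih =>
    rw [pvLoopB, h]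
    simp only []
    rw [ih]
    show dist2.length = dist.length
    have hlen : ∀ (d : List (Option Int)) (w nd : Int), (pvRelaxB d w nd n).length = d.length := by
      intro d w nd
      unfold pvRelaxB
      split_ifs
      · rcases hd : d.getD w.toNat none with _ | cur <;> simp
        split_ifs <;> simp
      · rfl
    rw [hlen, hlen]

-- ===== VERDICT (by name: the statement is the Claim_ definition above) =====
theorem calculate_spec : Claim_equal_calculate := by
  intro t hdom hpre
  unfold Spec_calculate calculate calculate_alt
  obtain ⟨hne, hprecond⟩ := hpre
  have hn1 : 0 < t.length := List.length_pos_of_ne_nil hne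
  have hset : PySem.List.pySet? (List.replicate t.length (none : Option Int)) 0 (some 0)
      = some ((List.replicate t.length (none : Option Int)).set 0 (some 0)) := by
    have h0 : PySem.List.pyIdx? t.length 0 = some 0 := by
      simp [PySem.List.pyIdx?]
      omega
    simp [PySem.List.pySet?, h0]
  simp only [hset]
  have hinv0 : pvInv t.length [((0 : Int), (0 : Int))] (List.replicate t.length false)
      ((List.replicate t.length (none : Option Int)).set 0 (some 0)) := by
    refine ⟨by simp, by simp, by simp, ?_, ?_⟩
    · intro k v hkv
      simp only [List.mem_singleton, Prod.mk.injEq] at hkv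
      refine ⟨0, hn1, by simp [hkv.2.symm], 0, ?_, by simp [hkv.1.symm]⟩
      rw [pvGetD_set]
      simp [hn1]
    · intro v hv hund d hd
      rw [pvGetD_set] at hd
      split_ifs at hd with h1
      · have hd0 : d = 0 := Option.some_inj.mp hd.symm
        have hv0 : v = 0 := h1.1.symm
        simp [hd0, hv0]
      · have hnone : (List.replicate t.length (none : Option Int)).getD v none = none := by
          rcases lt_or_ge v t.length with h | h
          · rw [List.getD_eq_getElem _ _ (by simpa using h)]
            simp
          · rw [List.getD_eq_default _ _ (by simpa using h)]
        rw [hnone] at hd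
        exact absurd hd (by simp)
  have hmain := pvMain t t.length rfl hprecond ((List.replicate t.length false).count false)
      (pvHeapPush [] (0, 0)) (List.replicate t.length false)
      ((List.replicate t.length (none : Option Int)).set 0 (some 0)) (le_refl _) hinv0
  rw [hmain]
  have hlenF : (pvLoopB t t.length (List.replicate t.length false)
      ((List.replicate t.length (none : Option Int)).set 0 (some 0))).length = t.length := by
    rw [pvLoopB_length]; simp
  have hcast : ((t.length : Int) - 1) = (((t.length - 1 : Nat)) : Int) := by omega
  rw [hcast, pvPyGet_inrange _ (t.length - 1) (none : Option Int) (by omega)]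
  rcases hres : (pvLoopB t t.length (List.replicate t.length false)
      ((List.replicate t.length (none : Option Int)).set 0 (some 0))).getD (t.length - 1) none
    with _ | dres <;> simp [hres]
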